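-- pv_equiv track=rewrite | github.com/Mehmet-yilmaz0/communication-server-project | kriptoloji/columnar_transposition.py | _get_column_order
-- ===== SOURCE A (Python) =====
-- def _get_column_order(key: str) -> list:
--     """
--     Key'den sütun sırasını belirler.
--
--     Algoritma:
--     1. Key'in her karakterine alfabetik sırada numara ver
--     2. Aynı karakterler için sırayla numara ver
--
--     Args:
--         key: Key kelimesi
--
--     Returns:
--         Sütun sırası listesi (her eleman sütun numarası)
--     """
--     # Key'i büyük harfe çevir
--     key = key.upper()
--
--     # Her karakterin alfabetik sırasını bul
--     key_with_indices = []
--     for i, char in enumerate(key):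
--         key_with_indices.append((char, i))
--
--     # Alfabetik sıraya göre sırala
--     sorted_key = sorted(key_with_indices, key=lambda x: (x[0], x[1]))
--
--     # Sütun sırasını oluştur
--     column_order = [0] * len(key)
--     for new_order, (char, original_index) in enumerate(sorted_key):
--         column_order[original_index] = new_order
--
--     return column_order
-- ===== SOURCE B (Python) =====
-- def _get_column_order(key: str) -> list:
--     """Rank each key character by counting smaller chars and earlier equal chars."""
--     k = key.upper()
--     n = len(k)
--     order = []
--     for i in range(n):
--         rank = 0
--         for j in range(n):
--             if k[j] < k[i] or (k[j] == k[i] and j < i):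
--                 rank += 1
--         order.append(rank)
--     return order
-- ===== Notes on version B (the rewrite author's own statement) =====
-- stated objective: alternative
-- what changed: Replaces build-pairs + stable sort + scatter-by-index with a direct double-counting loop: each rank is the number of strictly smaller characters plus the number of earlier equal characters; trades the sort for a simpler quadratic count.
import Mathlib
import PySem

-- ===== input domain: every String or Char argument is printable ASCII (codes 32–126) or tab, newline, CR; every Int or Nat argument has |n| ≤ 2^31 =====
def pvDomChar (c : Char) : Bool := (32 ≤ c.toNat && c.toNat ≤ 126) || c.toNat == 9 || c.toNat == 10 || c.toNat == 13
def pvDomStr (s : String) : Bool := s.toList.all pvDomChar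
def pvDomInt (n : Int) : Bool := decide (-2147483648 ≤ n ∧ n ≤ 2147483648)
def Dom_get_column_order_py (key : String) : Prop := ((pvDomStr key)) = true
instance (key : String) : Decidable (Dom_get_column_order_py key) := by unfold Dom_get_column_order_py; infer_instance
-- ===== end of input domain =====

-- B replaces build-pairs + stable sort + scatter with a direct double-counting of smaller / earlier-equal characters (alternative decomposition, same cost class).

-- ===== PORT A =====
def get_column_order_py (key : String) : List Int :=
  let key' := PySem.Str.upper key
  let key_with_indices :=
    (PySem.List.enumerate key'.toList 0).foldl
      (fun acc p => acc ++ [(p.2, p.1)]) ([] : List (Char × Int))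
  let sorted_key := PySem.List.sorted2 key_with_indices (fun x => x.1) (fun x => x.2) false
  let column_order := List.replicate (PySem.Str.len key').toNat (0 : Int)
  (PySem.List.enumerate sorted_key 0).foldl
    (fun acc p => PySem.List.pySetD acc p.2.2 p.1) column_order

-- ===== PORT B =====
def get_column_order_py_alt (key : String) : List Int :=
  let k := (PySem.Str.upper key).toList
  let n := (k.length : Int)
  (PySem.List.pyRange 0 n 1).foldl
    (fun order i =>
      order ++ [(PySem.List.pyRange 0 n 1).foldl
        (fun rank j =>
          if PySem.List.pyGetD k j ' ' < PySem.List.pyGetD k i ' ' ∨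
             (PySem.List.pyGetD k j ' ' = PySem.List.pyGetD k i ' ' ∧ j < i)
          then rank + 1 else rank) (0 : Int)]) ([] : List Int)

-- ===== PRECONDITION & SPEC =====
def Spec_get_column_order_py (key : String) (out : List Int) : Prop := out = get_column_order_py_alt key
instance (key : String) (out : List Int) : Decidable (Spec_get_column_order_py key out) := by unfold Spec_get_column_order_py; infer_instance

-- ===== CLAIM (what is proved, stated in full; the proofs are below) =====
def Claim_equal_get_column_order_py : Prop := ∀ (key : String), Dom_get_column_order_py key → Spec_get_column_order_py key (get_column_order_py key)

-- ===== LEMMAS AND PROOFS =====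

-- the lexicographic key Python's tuple key denotes
def pvKeyf (x : Char × Int) : Lex (Char × Int) := toLex (x.1, x.2)

-- the (char, index) pair list A builds
def pvPairs (u : List Char) : List (Char × Int) :=
  (PySem.List.enumerate u 0).map (fun p => (p.2, p.1))

theorem pvPairs_eq_map_range (u : List Char) :
    pvPairs u = (List.range u.length).map (fun j => (u.getD j ' ', (j : Int))) := by
  unfold pvPairs
  rw [PySem.List.enumerate_eq_map_pyRange u ' ']
  simp [PySem.List.pyRange_zero_natCast, List.map_map, Function.comp_def]

-- sorted2 with keys fst/snd is sorted with the lexicographic key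
theorem pvSorted2_eq_sorted_lex (xs : List (Char × Int)) :
    PySem.List.sorted2 xs (fun x => x.1) (fun x => x.2) false
      = PySem.List.sorted xs pvKeyf false := by
  rw [PySem.List.sorted_eq_foldl_insertBy]
  unfold PySem.List.sorted2
  have hb : (fun (a b : Char × Int) =>
      (decide (a.1 < b.1) || (!decide (b.1 < a.1) && decide (a.2 < b.2))))
      = (fun a b => decide (pvKeyf a < pvKeyf b)) := by
    funext a b
    rcases lt_trichotomy a.1 b.1 with h | h | h
    · simp [pvKeyf, Prod.Lex.lt_iff, h, asymm h]
    · simp [pvKeyf, Prod.Lex.lt_iff, h]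
    · simp [pvKeyf, Prod.Lex.lt_iff, h, asymm h, ne_of_gt h]
  simp only [hb]
  simp

-- length of the scatter loop's result
theorem pvLoop_length (s : List (Char × Int)) (c : Int) (acc : List Int) :
    ((PySem.List.enumerate s c).foldl
      (fun a p => PySem.List.pySetD a p.2.2 p.1) acc).length = acc.length := by
  induction s generalizing c acc with
  | nil => simp [PySem.List.enumerate]
  | cons q t ih =>
      rw [PySem.List.enumerate_cons]
      simp only [List.foldl_cons]
      rw [ih]
      exact PySem.List.length_pySetD acc q.2 c

-- cell i of the scatter loop: the position of the pair whose snd is i, offset by the counter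
theorem pvLoop_getElem? (s : List (Char × Int)) (c : Int) (acc : List Int)
    (hnd : (s.map (·.2)).Nodup) (hpos : ∀ q ∈ s, 0 ≤ q.2) (i : Nat) (hi : i < acc.length) :
    ((PySem.List.enumerate s c).foldl
      (fun a p => PySem.List.pySetD a p.2.2 p.1) acc)[i]? =
      some (match s.findIdx? (fun q => q.2 == (i : Int)) with
            | some k => c + k
            | none => acc[i]) := by
  induction s generalizing c acc with
  | nil => simp [PySem.List.enumerate, hi]
  | cons q t ih =>
      rw [PySem.List.enumerate_cons]
      simp only [List.foldl_cons, List.findIdx?_cons]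
      simp only [List.map_cons, List.nodup_cons] at hnd
      have h0 : 0 ≤ q.2 := hpos q (by simp)
      have hpt : ∀ x ∈ t, 0 ≤ x.2 := fun x hx => hpos x (by simp [hx])
      have hset : PySem.List.pySetD acc q.2 c = acc.set q.2.toNat c :=
        PySem.List.pySetD_of_nonneg acc c h0
      have hlen : (acc.set q.2.toNat c).length = acc.length := by simp
      rw [hset, ih (c + 1) _ hnd.2 hpt (by rw [hlen]; exact hi)]
      by_cases hq : q.2 = (i : Int)
      · have ht : t.findIdx? (fun q => q.2 == (i : Int)) = none := by
          rw [List.findIdx?_eq_none_iff]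
          intro x hx
          simp only [beq_eq_false_iff_ne, ne_eq]
          intro hx2
          apply hnd.1
          have hqx : q.2 = x.2 := by rw [hq, hx2]
          rw [hqx]
          exact List.mem_map_of_mem hx
        have hti : q.2.toNat = i := by omega
        have hgi : (acc.set q.2.toNat c)[i]'(by rw [hlen]; exact hi) = c := by
          simp [hti]
        simp [hq, ht]
      · have hne : q.2.toNat ≠ i := by omega
        have hgi : (acc.set q.2.toNat c)[i]'(by rw [hlen]; exact hi) = acc[i] :=
          List.getElem_set_ne hne _
        simp only [beq_iff_eq, hq, if_false, hgi]
        cases t.findIdx? (fun q => q.2 == (i : Int)) with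
        | none => simp
        | some k =>
            simp only [Option.map_some, Option.some.injEq]
            push_cast
            ring

-- rank in a strictly key-sorted list = number of strictly smaller keys
theorem pvRank_of_pairwise {α κ : Type} [LinearOrder κ] (f : α → κ) :
    ∀ (s : List α), s.Pairwise (fun a b => f a < f b) →
      ∀ (k : Nat) (hk : k < s.length) (y : α), s[k]'hk = y →
        s.countP (fun q => decide (f q < f y)) = k := by
  intro s
  induction s with
  | nil => intro _ k hk; simp at hk
  | cons x t ih =>
      intro hp k hk y hy
      rcases List.pairwise_cons.mp hp with ⟨hx, ht⟩
      cases k with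
      | zero =>
          simp only [List.getElem_cons_zero] at hy
          subst hy
          rw [List.countP_cons]
          have h1 : t.countP (fun q => decide (f q < f x)) = 0 := by
            rw [List.countP_eq_zero]
            intro q hq
            simp [not_lt.mpr (le_of_lt (hx q hq))]
          rw [h1]
          simp
      | succ m =>
          have hm : m < t.length := by simpa using hk
          simp only [List.getElem_cons_succ] at hy
          have hxt : f x < f y := by
            rw [← hy]
            exact hx _ (List.getElem_mem hm)
          rw [List.countP_cons, ih ht m hm y hy]
          simp [hxt]

-- first index with the given snd, when snds are nodup
theorem pvFindIdx_of_nodup :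
    ∀ (s : List (Char × Int)) (i : Nat), (s.map (·.2)).Nodup →
      ∀ (k : Nat) (hk : k < s.length), (s[k]'hk).2 = (i : Int) →
        s.findIdx? (fun q => q.2 == (i : Int)) = some k := by
  intro s
  induction s with
  | nil => intro i _ k hk; simp at hk
  | cons q t ih =>
      intro i hnd k hk hsnd
      simp only [List.map_cons, List.nodup_cons] at hnd
      rw [List.findIdx?_cons]
      cases k with
      | zero => simp only [List.getElem_cons_zero] at hsnd; simp [hsnd]
      | succ m =>
          have hm : m < t.length := by simpa using hk
          simp only [List.getElem_cons_succ] at hsnd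
          have hqne : ¬ q.2 = (i : Int) := by
            intro h
            apply hnd.1
            have : q.2 = (t[m]'hm).2 := by rw [h, hsnd]
            rw [this]
            exact List.mem_map_of_mem (List.getElem_mem hm)
          rw [ih i hnd.2 m hm hsnd]
          simp [hqne]

theorem pvPairs_snd_nodup (u : List Char) : ((pvPairs u).map (·.2)).Nodup := by
  rw [pvPairs_eq_map_range, List.map_map]
  simp only [Function.comp_def]
  exact (List.nodup_range).map (fun a b => by exact_mod_cast id)

theorem pvPairs_keyf_pairwise_ne (u : List Char) :
    (pvPairs u).Pairwise (fun a b => pvKeyf a ≠ pvKeyf b) := by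
  unfold pvPairs
  refine (PySem.List.pairwise_lt_enumerate u 0).map _ ?_
  intro a b hab h
  have h2 : a.1 = b.1 := congrArg (fun x => (ofLex x).2) h
  omega

theorem pvMem_pairs (u : List Char) {x : Char × Int} (hx : x ∈ pvPairs u) :
    ∃ j : Nat, j < u.length ∧ x = (u.getD j ' ', (j : Int)) := by
  rw [pvPairs_eq_map_range] at hx
  rcases List.mem_map.mp hx with ⟨j, hj, hx⟩
  exact ⟨j, List.mem_range.mp hj, hx.symm⟩

-- B unfolded to a map of counts over range
theorem pvAlt_eq (key : String) :
    get_column_order_py_alt key =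
      (List.range (PySem.Str.upper key).toList.length).map
        (fun i => (0 : Int) + ((List.range (PySem.Str.upper key).toList.length).countP
          (fun j => decide ((PySem.Str.upper key).toList.getD j ' ' < (PySem.Str.upper key).toList.getD i ' ' ∨
            ((PySem.Str.upper key).toList.getD j ' ' = (PySem.Str.upper key).toList.getD i ' ' ∧ (j : Int) < (i : Int)))) : Nat)) := by
  unfold get_column_order_py_alt
  simp only [PySem.List.pyRange_zero_natCast, List.foldl_map]
  rw [PySem.List.foldl_append_singleton_eq_map]
  simp only [List.nil_append]
  congr 1
  funext i
  rw [show (fun (rank : Int) (j : Nat) =>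
      if PySem.List.pyGetD (PySem.Str.upper key).toList (↑j) ' ' < PySem.List.pyGetD (PySem.Str.upper key).toList (↑i) ' ' ∨
         (PySem.List.pyGetD (PySem.Str.upper key).toList (↑j) ' ' = PySem.List.pyGetD (PySem.Str.upper key).toList (↑i) ' ' ∧ (j : Int) < (i : Int))
      then rank + 1 else rank)
    = (fun (rank : Int) (j : Nat) =>
      if (fun j : Nat => decide ((PySem.Str.upper key).toList.getD j ' ' < (PySem.Str.upper key).toList.getD i ' ' ∨
          ((PySem.Str.upper key).toList.getD j ' ' = (PySem.Str.upper key).toList.getD i ' ' ∧ (j : Int) < (i : Int)))) j = true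
      then rank + 1 else rank) from by
        funext rank j
        simp only [PySem.List.pyGetD_natCast, decide_eq_true_eq]]
  exact PySem.List.foldl_count_if _ _ _

-- A unfolded: sort the pairs by the lex key, then scatter
theorem pvA_eq (key : String) :
    get_column_order_py key =
      (PySem.List.enumerate
        (PySem.List.sorted (pvPairs (PySem.Str.upper key).toList) pvKeyf false) 0).foldl
        (fun acc p => PySem.List.pySetD acc p.2.2 p.1)
        (List.replicate (PySem.Str.upper key).toList.length (0 : Int)) := by
  unfold get_column_order_py
  dsimp only
  rw [PySem.List.foldl_append_singleton_eq_map, List.nil_append, pvSorted2_eq_sorted_lex]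
  have h1 : (PySem.Str.len (PySem.Str.upper key)).toNat = (PySem.Str.upper key).toList.length := by
    simp [PySem.Str.len]
  rw [h1]
  rfl

-- ===== VERDICT (by name: the statement is the Claim_ definition above) =====
set_option maxHeartbeats 1000000 in
theorem get_column_order_py_spec : Claim_equal_get_column_order_py := by
  intro key _
  unfold Spec_get_column_order_py
  rw [pvA_eq, pvAlt_eq]
  set u := (PySem.Str.upper key).toList with hu
  set n := u.length with hn
  set s := PySem.List.sorted (pvPairs u) pvKeyf false with hs
  have hperm : s.Perm (pvPairs u) := PySem.List.sorted_perm _ _ _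
  have hnd : (s.map (·.2)).Nodup := ((hperm.map (·.2)).nodup_iff).mpr (pvPairs_snd_nodup u)
  have hposs : ∀ q ∈ s, 0 ≤ q.2 := by
    intro q hq
    rcases pvMem_pairs u (hperm.subset hq) with ⟨j, _, hj⟩
    rw [hj]; exact Int.natCast_nonneg j
  have hpair : s.Pairwise (fun a b => pvKeyf a < pvKeyf b) := by
    have hle : s.Pairwise (fun a b => pvKeyf a ≤ pvKeyf b) := PySem.List.sorted_pairwise _ _
    have hne : s.Pairwise (fun a b => pvKeyf a ≠ pvKeyf b) :=
      ((hperm.pairwise_iff (fun h => Ne.symm h)).mpr (pvPairs_keyf_pairwise_ne u))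
    exact (hle.and hne).imp (fun h => lt_of_le_of_ne h.1 h.2)
  apply List.ext_getElem?
  intro i
  by_cases hi : i < n
  · -- the pair for index i and its position in s
    have hmem : (u.getD i ' ', (i : Int)) ∈ s := by
      apply hperm.mem_iff.mpr
      rw [pvPairs_eq_map_range]
      exact List.mem_map.mpr ⟨i, List.mem_range.mpr hi, rfl⟩
    rcases List.mem_iff_getElem.mp hmem with ⟨k, hk, hsk⟩
    have hfind : s.findIdx? (fun q => q.2 == (i : Int)) = some k :=
      pvFindIdx_of_nodup s i hnd k hk (by rw [hsk])
    have hlenr : i < (List.replicate n (0 : Int)).length := by simpa using hi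
    rw [pvLoop_getElem? s 0 _ hnd hposs i hlenr, hfind]
    have hrank : s.countP (fun q => decide (pvKeyf q < pvKeyf (u.getD i ' ', (i : Int)))) = k :=
      pvRank_of_pairwise pvKeyf s hpair k hk _ hsk
    have hcnt : s.countP (fun q => decide (pvKeyf q < pvKeyf (u.getD i ' ', (i : Int))))
        = (List.range n).countP
          (fun j => decide (u.getD j ' ' < u.getD i ' ' ∨ (u.getD j ' ' = u.getD i ' ' ∧ (j : Int) < (i : Int)))) := by
      rw [hperm.countP_eq, pvPairs_eq_map_range, List.countP_map]
      apply List.countP_congr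
      intro j _
      simp [Function.comp, pvKeyf, Prod.Lex.lt_iff]
    rw [List.getElem?_map, List.getElem?_range hi]
    simp only [Option.map_some]
    rw [← hcnt, hrank]
  · have hA : ((PySem.List.enumerate s 0).foldl
        (fun acc p => PySem.List.pySetD acc p.2.2 p.1) (List.replicate n (0 : Int))).length = n := by
      rw [pvLoop_length]; simp
    rw [List.getElem?_eq_none (by rw [hA]; omega),
        List.getElem?_eq_none (by simp; omega)]
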